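-- pv_equiv track=rewrite | github.com/qazwsxedc121/lex_mint | src/api/services/retrieval_query_planner_service.py | _normalize_queries
-- ===== SOURCE A (Python) =====
-- def _normalize_queries(
--     original_query: str, candidate_queries: list[str], max_queries: int
-- ) -> list[str]:
--     limit = max(1, min(8, int(max_queries or 3)))
--     normalized_original = " ".join(str(original_query or "").split()).strip()
--     if not normalized_original:
--         return []
--
--     final_queries = [normalized_original]
--     seen = {normalized_original.lower()}
--
--     for candidate in candidate_queries:
--         query = " ".join(str(candidate or "").split()).strip()
--         if not query:
--             continue
--         key = query.lower()
--         if key in seen: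
--             continue
--         seen.add(key)
--         final_queries.append(query)
--         if len(final_queries) >= limit:
--             break
--
--     return final_queries
-- ===== SOURCE B (Python) =====
-- def _normalize_queries(
--     original_query: str, candidate_queries: list[str], max_queries: int
-- ) -> list[str]:
--     limit = max(1, min(8, int(max_queries or 3)))
--     norms = [" ".join(str(q or "").split()).strip()
--              for q in [original_query] + list(candidate_queries)]
--     if not norms[0]:
--         return []
--
--     def dedup(xs):
--         if not xs:
--             return []
--         head = xs[0]
--         return [head] + dedup([x for x in xs[1:] if x.lower() != head.lower()])
--
--     return dedup([q for q in norms if q])[:limit]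
-- ===== Notes on version B (the rewrite author's own statement) =====
-- stated objective: alternative
-- what changed: Replaces A's single accumulate-and-early-break loop with a seen-set by staged passes: normalize every string up front, then deduplicate by structural recursion that filters all later case-insensitive duplicates of the head out of the tail (no seen-set at all), then slice to the limit.
-- intended difference: When max_queries caps the result at 1 (max_queries nonzero and <= 1), the original is nonempty and some candidate normalizes to a new case-insensitive query, A returns 2 queries (its break fires only after appending, overshooting the cap) while B returns exactly 1, which is the intended cap. — e.g. on _normalize_queries("a", ["b"], 1): A returns ["a", "b"], B returns ["a"]
import Mathlib
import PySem

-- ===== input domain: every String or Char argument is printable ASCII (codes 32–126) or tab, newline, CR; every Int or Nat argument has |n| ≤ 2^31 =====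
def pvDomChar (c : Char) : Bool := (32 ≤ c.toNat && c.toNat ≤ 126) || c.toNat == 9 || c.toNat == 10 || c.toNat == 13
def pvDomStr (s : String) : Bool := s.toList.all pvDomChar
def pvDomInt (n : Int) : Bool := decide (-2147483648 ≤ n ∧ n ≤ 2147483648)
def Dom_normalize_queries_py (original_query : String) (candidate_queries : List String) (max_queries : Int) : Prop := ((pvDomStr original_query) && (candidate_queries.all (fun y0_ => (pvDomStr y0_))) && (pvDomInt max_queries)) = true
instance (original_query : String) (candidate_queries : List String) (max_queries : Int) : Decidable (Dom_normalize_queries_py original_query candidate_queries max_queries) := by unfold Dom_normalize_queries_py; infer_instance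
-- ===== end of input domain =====

-- B replaces A's accumulate-and-early-break loop with a seen-set by staged passes:
-- normalize all, recursive filter-out-duplicates dedup, slice to the limit (objective: alternative).

-- shared normalization helper: " ".join(str(s or "").split()).strip()
def pvNorm (s : String) : String :=
  PySem.Str.strip (PySem.Str.join " " (PySem.Str.split₀ (if s = "" then "" else s)))

-- ===== PORT A =====
def pvALoop (limit : Int) (cands : List String) (final : List String) (seen : PySem.Set String) : List String :=
  match cands with
  | [] => final
  | c :: rest =>
    let query := pvNorm c
    if query = "" then pvALoop limit rest final seen
    else
      let key := PySem.Str.lower query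
      if PySem.Set.contains seen key then pvALoop limit rest final seen
      else
        let seen' := PySem.Set.add seen key
        let final' := final ++ [query]
        if limit ≤ (final'.length : Int) then final' else pvALoop limit rest final' seen'

def normalize_queries_py (original_query : String) (candidate_queries : List String) (max_queries : Int) : List String :=
  if pvNorm original_query = "" then []
  else
    pvALoop (max 1 (min 8 (if max_queries = 0 then 3 else max_queries))) candidate_queries
      [pvNorm original_query]
      (PySem.Set.add PySem.Set.empty (PySem.Str.lower (pvNorm original_query)))

-- ===== PORT B =====
-- dedup(xs): keep head, recurse on the tail with all case-insensitive duplicates of the head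
-- filtered out; fuel = length makes the same recursion structural (the fuel-0 branch is unreachable)
def pvDedupGo : Nat → List String → List String
  | _, [] => []
  | 0, _ :: _ => []
  | n + 1, h :: t => h :: pvDedupGo n (t.filter (fun x => PySem.Str.lower x ≠ PySem.Str.lower h))

def pvDedup (xs : List String) : List String := pvDedupGo xs.length xs

def normalize_queries_py_alt (original_query : String) (candidate_queries : List String) (max_queries : Int) : List String :=
  let limit : Int := max 1 (min 8 (if max_queries = 0 then 3 else max_queries))
  let norms := (original_query :: candidate_queries).map pvNorm
  if norms.headD "" = "" then []
  else PySem.List.slice (pvDedup (norms.filter (fun q => q ≠ ""))) none (some limit)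

-- ===== PRECONDITION & SPEC =====
-- When max_queries caps the result at 1 (max_queries ≠ 0 and ≤ 1), the original is nonempty and some candidate
-- normalizes to a new case-insensitive query, A returns 2 queries (its break fires only after appending,
-- overshooting the cap) while B returns exactly 1, which is the intended cap.
def D_normalize_queries_py (original_query : String) (candidate_queries : List String) (max_queries : Int) : Prop :=
  max_queries ≤ 1 ∧ max_queries ≠ 0 ∧ pvNorm original_query ≠ "" ∧
    ∃ c ∈ candidate_queries, pvNorm c ≠ "" ∧ PySem.Str.lower (pvNorm c) ≠ PySem.Str.lower (pvNorm original_query)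
instance (original_query : String) (candidate_queries : List String) (max_queries : Int) : Decidable (D_normalize_queries_py original_query candidate_queries max_queries) := by unfold D_normalize_queries_py; infer_instance

def Spec_normalize_queries_py (original_query : String) (candidate_queries : List String) (max_queries : Int) (out : List String) : Prop := ¬ D_normalize_queries_py original_query candidate_queries max_queries → out = normalize_queries_py_alt original_query candidate_queries max_queries
instance (original_query : String) (candidate_queries : List String) (max_queries : Int) (out : List String) : Decidable (Spec_normalize_queries_py original_query candidate_queries max_queries out) := by unfold Spec_normalize_queries_py; infer_instance

def pvDiffWitness_normalize_queries_py : String × List String × Int := ("a", ["b"], 1)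
def pvDiffWitnessOut_normalize_queries_py : (List String) × (List String) := (["a", "b"], ["a"])

-- ===== CLAIM (what is proved, stated in full; the proofs are below) =====
def Claim_unchanged_normalize_queries_py : Prop := ∀ (original_query : String) (candidate_queries : List String) (max_queries : Int), Dom_normalize_queries_py original_query candidate_queries max_queries → Spec_normalize_queries_py original_query candidate_queries max_queries (normalize_queries_py original_query candidate_queries max_queries)
def Claim_changed_normalize_queries_py : Prop := Dom_normalize_queries_py (pvDiffWitness_normalize_queries_py.1) (pvDiffWitness_normalize_queries_py.2.1) (pvDiffWitness_normalize_queries_py.2.2) ∧ D_normalize_queries_py (pvDiffWitness_normalize_queries_py.1) (pvDiffWitness_normalize_queries_py.2.1) (pvDiffWitness_normalize_queries_py.2.2) ∧ normalize_queries_py (pvDiffWitness_normalize_queries_py.1) (pvDiffWitness_normalize_queries_py.2.1) (pvDiffWitness_normalize_queries_py.2.2) = pvDiffWitnessOut_normalize_queries_py.1 ∧ normalize_queries_py_alt (pvDiffWitness_normalize_queries_py.1) (pvDiffWitness_normalize_queries_py.2.1) (pvDiffWitness_normalize_queries_py.2.2) = pvDiffWitnessOut_normalize_queries_py.2 ∧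 pvDiffWitnessOut_normalize_queries_py.1 ≠ pvDiffWitnessOut_normalize_queries_py.2
def Claim_exact_normalize_queries_py : Prop := ∀ (original_query : String) (candidate_queries : List String) (max_queries : Int), Dom_normalize_queries_py original_query candidate_queries max_queries → D_normalize_queries_py original_query candidate_queries max_queries → normalize_queries_py original_query candidate_queries max_queries ≠ normalize_queries_py_alt original_query candidate_queries max_queries

-- ===== LEMMAS AND PROOFS =====

-- fuel irrelevance and the two equations of pvDedup
lemma pvDedupGo_fuel : ∀ (n m : Nat) (xs : List String), xs.length ≤ n → xs.length ≤ m →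
    pvDedupGo n xs = pvDedupGo m xs := by
  intro n
  induction n with
  | zero =>
    intro m xs hn _
    cases xs with
    | nil => cases m <;> rfl
    | cons h t => simp at hn
  | succ n ih =>
    intro m xs hn hm
    cases xs with
    | nil => cases m <;> rfl
    | cons h t =>
      cases m with
      | zero => simp at hm
      | succ m =>
        simp only [pvDedupGo]
        congr 1
        exact ih m _ (le_trans (List.length_filter_le _ _) (by simpa using hn))
          (le_trans (List.length_filter_le _ _) (by simpa using hm))

lemma pvDedup_nil : pvDedup [] = [] := rfl

lemma pvDedup_cons (h : String) (t : List String) :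
    pvDedup (h :: t) = h :: pvDedup (t.filter (fun x => PySem.Str.lower x ≠ PySem.Str.lower h)) := by
  unfold pvDedup
  simp only [List.length_cons, pvDedupGo]
  congr 1
  exact pvDedupGo_fuel t.length _ _ (List.length_filter_le _ _) (le_refl _)

-- A's loop equals (start ++) the capped take of B's filter-based dedup of the not-yet-seen normalized candidates
lemma pvLoop_dedup (limit : Int) (cands : List String) (final : List String) (seen : PySem.Set String)
    (hlen : (final.length : Int) < limit) :
    pvALoop limit cands final seen
      = final ++ (pvDedup ((cands.map pvNorm).filter
          (fun q => q ≠ "" && !PySem.Set.contains seen (PySem.Str.lower q)))).take (limit.toNat - final.length) := by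
  induction cands generalizing final seen with
  | nil => simp [pvALoop, pvDedup_nil]
  | cons c rest ih =>
    simp only [pvALoop, List.map_cons, List.filter_cons]
    by_cases hq : pvNorm c = ""
    · simp only [hq]
      simpa [hq] using ih final seen hlen
    · simp only [if_neg hq]
      by_cases hmem : PySem.Set.contains seen (PySem.Str.lower (pvNorm c)) = true
      · simp only [hmem, if_true]
        rw [if_neg (by simp)]
        exact ih final seen hlen
      · rw [Bool.not_eq_true] at hmem
        simp only [hmem, Bool.false_eq_true, if_false, Bool.not_false, Bool.and_true]
        rw [if_pos (show decide (pvNorm c ≠ "") = true by simp [hq])]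
        have htake : limit.toNat - final.length = (limit.toNat - (final.length + 1)) + 1 := by omega
        rw [htake, pvDedup_cons, List.take_succ_cons]
        have hfilters :
            (rest.map pvNorm).filter
                (fun q => q ≠ "" && !PySem.Set.contains (PySem.Set.add seen (PySem.Str.lower (pvNorm c))) (PySem.Str.lower q))
              = ((rest.map pvNorm).filter
                  (fun q => q ≠ "" && !PySem.Set.contains seen (PySem.Str.lower q))).filter
                  (fun x => PySem.Str.lower x ≠ PySem.Str.lower (pvNorm c)) := by
          rw [List.filter_filter]
          apply List.filter_congr
          intro x _
          have hadd : PySem.Set.contains (PySem.Set.add seen (PySem.Str.lower (pvNorm c))) (PySem.Str.lower x)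
              = (PySem.Set.contains seen (PySem.Str.lower x) || (PySem.Str.lower x == PySem.Str.lower (pvNorm c))) := by
            rw [Bool.eq_iff_iff, PySem.Set.contains_iff, PySem.Set.mem_add]
            simp
          rw [hadd]
          by_cases hx : x = "" <;> by_cases hs : PySem.Set.contains seen (PySem.Str.lower x) = true <;>
            by_cases he : PySem.Str.lower x = PySem.Str.lower (pvNorm c) <;> simp [hx, hs, he]
        by_cases hbreak : limit ≤ (((final ++ [pvNorm c]).length : Nat) : Int)
        · rw [if_pos hbreak]
          have h0 : limit.toNat - (final.length + 1) = 0 := by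
            simp only [List.length_append, List.length_cons, List.length_nil] at hbreak
            omega
          rw [h0]
          simp
        · rw [if_neg hbreak]
          have hlen' : (((final ++ [pvNorm c]).length : Nat) : Int) < limit := by omega
          rw [ih (final ++ [pvNorm c]) (PySem.Set.add seen (PySem.Str.lower (pvNorm c))) hlen', hfilters]
          simp [List.length_append]

-- skip case: every candidate normalizes empty or to a key already in seen ⇒ A's loop returns final unchanged
lemma pvLoop_skip (limit : Int) (cands : List String) (seen : PySem.Set String) (final : List String)
    (hskip : ∀ c ∈ cands, pvNorm c = "" ∨ PySem.Set.contains seen (PySem.Str.lower (pvNorm c)) = true) :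
    pvALoop limit cands final seen = final := by
  induction cands with
  | nil => rfl
  | cons c rest ih =>
    have hc := hskip c (by simp)
    have hrest := ih (fun c' hc' => hskip c' (by simp [hc']))
    rcases hc with hq | hk
    · simp only [pvALoop, hq]; simpa using hrest
    · by_cases hq : pvNorm c = ""
      · simp only [pvALoop, hq]; simpa using hrest
      · simp only [pvALoop, if_neg hq, hk, if_true]; exact hrest

-- limit = 1 exactly when max_queries is nonzero and ≤ 1
lemma pvLimit_pos (mq : Int) : 1 ≤ max 1 (min 8 (if mq = 0 then 3 else mq)) := le_max_left _ _

lemma pvLimit_eq_one_iff (mq : Int) :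
    max 1 (min 8 (if mq = 0 then 3 else mq)) = 1 ↔ (mq ≤ 1 ∧ mq ≠ 0) := by
  split_ifs with h <;> omega

-- inside D_ with limit = 1, A's loop appends once and breaks: the result has length 2
lemma pvLoop_two (cands : List String) (final : List String) (seen : PySem.Set String)
    (hfin : final.length = 1)
    (hex : ∃ c ∈ cands, pvNorm c ≠ "" ∧ PySem.Set.contains seen (PySem.Str.lower (pvNorm c)) = false) :
    (pvALoop 1 cands final seen).length = 2 := by
  induction cands generalizing final seen with
  | nil => obtain ⟨c, hc, _⟩ := hex; simp at hc
  | cons c rest ih =>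
    obtain ⟨w, hw, hwq, hws⟩ := hex
    by_cases hq : pvNorm c = ""
    · simp only [pvALoop, hq]
      refine ih final seen hfin ⟨w, ?_, hwq, hws⟩
      rcases List.mem_cons.mp hw with h | h
      · subst h; exact absurd hq hwq
      · exact h
    · simp only [pvALoop, if_neg hq]
      by_cases hmem : PySem.Set.contains seen (PySem.Str.lower (pvNorm c)) = true
      · simp only [hmem, if_true]
        refine ih final seen hfin ⟨w, ?_, hwq, hws⟩
        rcases List.mem_cons.mp hw with h | h
        · subst h; rw [hws] at hmem; exact absurd hmem (by simp)
        · exact h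
      · rw [Bool.not_eq_true] at hmem
        simp only [hmem, Bool.false_eq_true, if_false]
        have hcond : (1 : Int) ≤ (((final ++ [pvNorm c]).length : Nat) : Int) := by
          simp only [List.length_append, hfin]; push_cast; omega
        rw [if_pos hcond]
        simp [hfin]

-- unfolding B at a nonempty normalized original
lemma pvAlt_eval (oq : String) (cqs : List String) (mq : Int) (hno : pvNorm oq ≠ "") :
    normalize_queries_py_alt oq cqs mq
      = pvNorm oq ::
        (pvDedup (((cqs.map pvNorm).filter (fun q => decide (q ≠ ""))).filter
          (fun x => PySem.Str.lower x ≠ PySem.Str.lower (pvNorm oq)))).take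
          ((max 1 (min 8 (if mq = 0 then 3 else mq))).toNat - 1) := by
  have hpos := pvLimit_pos mq
  unfold normalize_queries_py_alt
  simp only [List.map_cons, List.headD_cons, hno, if_false]
  rw [List.filter_cons_of_pos (by simp [hno]), pvDedup_cons]
  rw [show (max 1 (min 8 (if mq = 0 then 3 else mq)))
      = (((max 1 (min 8 (if mq = 0 then 3 else mq))).toNat : Nat) : Int) by omega,
    PySem.List.slice_to_natCast]
  rw [show (max 1 (min 8 (if mq = 0 then 3 else mq))).toNat
      = ((max 1 (min 8 (if mq = 0 then 3 else mq))).toNat - 1) + 1 by omega]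
  rw [List.take_succ_cons]
  simp

-- ===== VERDICT (by name: the statement is the Claim_ definition above) =====
theorem normalize_queries_py_spec : Claim_unchanged_normalize_queries_py := by
  intro oq cqs mq _ hnd
  by_cases hno : pvNorm oq = ""
  · unfold normalize_queries_py normalize_queries_py_alt
    simp [hno]
  · rw [pvAlt_eval oq cqs mq hno]
    simp only [normalize_queries_py, if_neg hno]
    set limit : Int := max 1 (min 8 (if mq = 0 then 3 else mq)) with hlimit
    have hpos := pvLimit_pos mq
    by_cases h1 : limit = 1
    · have hmq : mq ≤ 1 ∧ mq ≠ 0 := (pvLimit_eq_one_iff mq).mp h1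
      have hskip : ∀ c ∈ cqs, pvNorm c = "" ∨
          PySem.Set.contains (PySem.Set.add PySem.Set.empty (PySem.Str.lower (pvNorm oq)))
            (PySem.Str.lower (pvNorm c)) = true := by
        intro c hc
        by_cases hq : pvNorm c = ""
        · exact Or.inl hq
        · right
          have he : PySem.Str.lower (pvNorm c) = PySem.Str.lower (pvNorm oq) := by
            by_contra hne
            exact hnd ⟨hmq.1, hmq.2, hno, c, hc, hq, hne⟩
          rw [PySem.Set.contains_iff, he, PySem.Set.mem_add]
          simp
      rw [pvLoop_skip limit cqs _ _ hskip, h1]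
      simp
    · have hfe : (cqs.map pvNorm).filter
            (fun q => q ≠ "" && !PySem.Set.contains (PySem.Set.add PySem.Set.empty (PySem.Str.lower (pvNorm oq))) (PySem.Str.lower q))
          = ((cqs.map pvNorm).filter (fun q => decide (q ≠ ""))).filter
              (fun x => PySem.Str.lower x ≠ PySem.Str.lower (pvNorm oq)) := by
        rw [List.filter_filter]
        apply List.filter_congr
        intro x _
        have hseen : PySem.Set.contains (PySem.Set.add PySem.Set.empty (PySem.Str.lower (pvNorm oq)))
            (PySem.Str.lower x) = (PySem.Str.lower x == PySem.Str.lower (pvNorm oq)) := by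
          rw [Bool.eq_iff_iff, beq_iff_eq, PySem.Set.contains_iff, PySem.Set.mem_add]
          simp [PySem.Set.empty]
        rw [hseen]
        by_cases hx : x = "" <;> by_cases he : PySem.Str.lower x = PySem.Str.lower (pvNorm oq) <;>
          simp [hx, he]
      rw [pvLoop_dedup limit cqs [pvNorm oq]
        (PySem.Set.add PySem.Set.empty (PySem.Str.lower (pvNorm oq))) (by simp; omega), hfe]
      simp

theorem normalize_queries_py_changed : Claim_changed_normalize_queries_py := by
  unfold Claim_changed_normalize_queries_py; decide

theorem normalize_queries_py_tight : Claim_exact_normalize_queries_py := by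
  intro oq cqs mq _ hd
  obtain ⟨hm1, hm0, hno, c, hc, hq, hne⟩ := hd
  have h1 : max 1 (min 8 (if mq = 0 then 3 else mq)) = 1 := (pvLimit_eq_one_iff mq).mpr ⟨hm1, hm0⟩
  intro heq
  have hA : (normalize_queries_py oq cqs mq).length = 2 := by
    simp only [normalize_queries_py, if_neg hno, h1]
    apply pvLoop_two cqs [pvNorm oq] _ (by simp)
    refine ⟨c, hc, hq, ?_⟩
    rw [← Bool.not_eq_true, PySem.Set.contains_iff, PySem.Set.mem_add]
    simp [PySem.Set.empty, hne]
  have hB : (normalize_queries_py_alt oq cqs mq).length ≤ 1 := by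
    rw [pvAlt_eval oq cqs mq hno, h1]
    simp
  rw [heq] at hA
  omega
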